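-- pv_equiv track=rewrite | github.com/droubarka/arabic-mode | arabicmode/arabicmode.py | string_remapper
-- ===== SOURCE A (Python) =====
-- def string_remapper(text: str, char_map: dict, escape_map: dict, escape_char: str = '\\') -> str:
-- 	"""
-- 	Remaps characters in a string according to two mapping dictionaries.
--
-- 	Args:
-- 		text: The input string to be remapped.
-- 		char_map: A dictionary mapping characters to their replacements.
-- 		escape_map: A dictionary mapping escaped characters to their replacement.
-- 		escape_char: The escape character. Default to '\\' (backslash).
--
-- 	Returns:
-- 		The remapped string.
-- 	"""
-- 	translated_text = ""
-- 	escaped = False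
-- 	for char in text:
-- 		if (not escaped) and (char == escape_char):
-- 			escaped = True
-- 			continue
--
-- 		if not escaped:
-- 			translated_text += ( \
-- 				mapped_char if (mapped_char:=char_map.get(char)) else char)
-- 		else:
-- 			translated_text += ( \
-- 				mapped_char if (mapped_char:=escape_map.get(char)) else char)
-- 			escaped = False
--
-- 	return translated_text
-- ===== SOURCE B (Python) =====
-- def string_remapper(text: str, char_map: dict, escape_map: dict, escape_char: str = '\\') -> str:
-- 	"""Split-based staged reimplementation: split the text on the escape
-- 	character, remap the first fragment plainly, and treat each later
-- 	fragment boundary as an escape (an empty fragment means the escape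
-- 	escaped another escape character, consuming the next fragment)."""
-- 	def sub(m, c):
-- 		v = m.get(c)
-- 		return v if v else c
--
-- 	def plain(s):
-- 		return ''.join(sub(char_map, c) for c in s)
--
-- 	if len(escape_char) != 1:
-- 		# a multi-char (or empty) escape string can never equal a single char
-- 		return plain(text)
--
-- 	parts = text.split(escape_char)
-- 	pieces = [plain(parts[0])]
-- 	k = 1
-- 	while k < len(parts):
-- 		p = parts[k]
-- 		if p:
-- 			pieces.append(sub(escape_map, p[0]) + plain(p[1:]))
-- 			k += 1
-- 		else:
-- 			if k + 1 >= len(parts):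
-- 				break  # trailing escape is dropped
-- 			pieces.append(sub(escape_map, escape_char) + plain(parts[k + 1]))
-- 			k += 2
-- 	return ''.join(pieces)
-- ===== Notes on version B (the rewrite author's own statement) =====
-- stated objective: alternative
-- what changed: Replaced A's character-by-character scan carrying an 'escaped' boolean across iterations by a staged algorithm: split the text on the escape character once, remap the first fragment plainly, then walk the fragment list treating each boundary as an escape (an empty fragment consumes the following one, realising an escaped escape character); no per-character escape state remains.
import Mathlib
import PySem

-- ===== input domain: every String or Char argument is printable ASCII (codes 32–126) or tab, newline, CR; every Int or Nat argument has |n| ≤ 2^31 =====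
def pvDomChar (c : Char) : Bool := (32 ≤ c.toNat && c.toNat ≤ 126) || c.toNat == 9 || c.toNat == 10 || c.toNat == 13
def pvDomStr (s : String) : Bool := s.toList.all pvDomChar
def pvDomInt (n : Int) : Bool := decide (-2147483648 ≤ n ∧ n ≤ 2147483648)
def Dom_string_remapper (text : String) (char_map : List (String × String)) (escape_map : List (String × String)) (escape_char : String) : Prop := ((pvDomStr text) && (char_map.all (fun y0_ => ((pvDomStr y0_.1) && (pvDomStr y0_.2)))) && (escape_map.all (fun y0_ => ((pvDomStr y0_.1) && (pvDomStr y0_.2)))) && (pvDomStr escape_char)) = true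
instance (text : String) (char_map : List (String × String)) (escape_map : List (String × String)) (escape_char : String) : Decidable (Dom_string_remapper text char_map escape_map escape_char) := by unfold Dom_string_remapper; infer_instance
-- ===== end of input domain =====

-- B replaces A's char-by-char scan with an 'escaped' flag by a staged algorithm:
-- split on the escape character once, then translate the fragment list; same return value.

-- ===== PORT A =====
-- `mapped_char if (mapped_char := m.get(char)) else char` — Python truthiness: None and "" fall back to char
def pvMapGet (m : List (String × String)) (ch : String) : String :=
  match PySem.Dict.get? (PySem.Dict.mk m) ch with
  | some s => if s = "" then ch else s
  | none => ch

-- A's loop: one char at a time, with the `escaped` flag carried across iterations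
def pvALoop (char_map escape_map : List (String × String)) (escape_char : String) :
    List Char → String → Bool → String
  | [], acc, _ => acc
  | c :: rest, acc, escaped =>
    if ¬escaped ∧ String.ofList [c] = escape_char then
      pvALoop char_map escape_map escape_char rest acc true
    else if ¬escaped then
      pvALoop char_map escape_map escape_char rest (acc ++ pvMapGet char_map (String.ofList [c])) false
    else
      pvALoop char_map escape_map escape_char rest (acc ++ pvMapGet escape_map (String.ofList [c])) false

def string_remapper (text : String) (char_map : List (String × String)) (escape_map : List (String × String)) (escape_char : String) : String :=
  pvALoop char_map escape_map escape_char text.toList "" false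

-- ===== PORT B =====
-- `v if v else c` with v = m.get(c): None and "" fall back to c
def pvSub (m : List (String × String)) (ch : String) : String :=
  match PySem.Dict.get? (PySem.Dict.mk m) ch with
  | some v => if v = "" then ch else v
  | none => ch

-- plain(s) = ''.join(sub(char_map, c) for c in s)
def pvPlain (char_map : List (String × String)) (s : List Char) : String :=
  String.join (s.map (fun c => pvSub char_map (String.ofList [c])))

-- the while-loop over parts[1:]: a non-empty fragment starts with an escaped char;
-- an empty fragment is an escaped escape char, which consumes the next fragment
def pvBParts (char_map escape_map : List (String × String)) (escape_char : String) :
    List String → List String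
  | [] => []
  | p :: rest =>
    match p.toList with
    | c :: cs =>
        (pvSub escape_map (String.ofList [c]) ++ pvPlain char_map cs)
          :: pvBParts char_map escape_map escape_char rest
    | [] =>
      match rest with
      | [] => []   -- trailing escape is dropped
      | q :: rest' =>
          (pvSub escape_map escape_char ++ pvPlain char_map q.toList)
            :: pvBParts char_map escape_map escape_char rest'

def string_remapper_alt (text : String) (char_map : List (String × String)) (escape_map : List (String × String)) (escape_char : String) : String :=
  if PySem.Str.len escape_char = 1 then
    match PySem.Str.split? text escape_char with
    | some (p0 :: rest) =>
        String.join (pvPlain char_map p0.toList :: pvBParts char_map escape_map escape_char rest)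
    | _ => pvPlain char_map text.toList   -- unreachable: split? with a 1-char sep returns some nonempty
  else
    pvPlain char_map text.toList

-- ===== PRECONDITION & SPEC =====
def Spec_string_remapper (text : String) (char_map : List (String × String)) (escape_map : List (String × String)) (escape_char : String) (out : String) : Prop := out = string_remapper_alt text char_map escape_map escape_char
instance (text : String) (char_map : List (String × String)) (escape_map : List (String × String)) (escape_char : String) (out : String) : Decidable (Spec_string_remapper text char_map escape_map escape_char out) := by unfold Spec_string_remapper; infer_instance

-- ===== CLAIM =====
def Claim_equal_string_remapper : Prop := ∀ (text : String) (char_map : List (String × String)) (escape_map : List (String × String)) (escape_char : String), Dom_string_remapper text char_map escape_map escape_char → Spec_string_remapper text char_map escape_map escape_char (string_remapper text char_map escape_map escape_char)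

-- ===== LEMMAS AND PROOFS =====

theorem pvMapGet_eq_pvSub : pvMapGet = pvSub := rfl

theorem modifyHead_id' {α : Type} (l : List α) : List.modifyHead (fun x => x) l = l := by
  cases l <;> simp

theorem foldl_append_str (l : List String) :
    ∀ a : String, List.foldl (fun r s => r ++ s) a l
      = a ++ List.foldl (fun r s => r ++ s) "" l := by
  induction l with
  | nil => intro a; simp [List.foldl]
  | cons x xs ih =>
    intro a
    simp only [List.foldl]
    rw [ih (a ++ x), ih ("" ++ x)]
    simp [String.append_assoc, String.empty_append]

theorem join_cons (a : String) (l : List String) :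
    String.join (a :: l) = a ++ String.join l := by
  simp only [String.join, List.foldl]
  rw [foldl_append_str l ("" ++ a)]
  simp [String.empty_append]

theorem join_nil_str : String.join [] = "" := rfl

-- characterisation of PySem's fuel-based splitter for a one-char separator
theorem splitOn_go_spec (e : Char) :
    ∀ (n : Nat) (l : List Char), l.length < n → ∀ (cur : List Char) (acc : List (List Char)),
      PySem.Chars.splitOn.go [e] n l cur acc
        = acc.reverse ++ (l.splitOn e).modifyHead (cur.reverse ++ ·) := by
  intro n
  induction n with
  | zero => intro l hl; omega
  | succ n ih =>
    intro l hl cur acc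
    cases l with
    | nil => simp [PySem.Chars.splitOn.go, List.splitOn]
    | cons c rest =>
      by_cases h : c = e
      · subst h
        have : [c].isPrefixOf (c :: rest) = true := by simp [List.isPrefixOf]
        rw [PySem.Chars.splitOn.go, if_pos this]
        simp only [List.length, List.drop]
        rw [ih rest (by simp at hl; omega) [] (List.reverse cur :: acc)]
        simp [List.splitOn, List.splitOnP_cons, modifyHead_id']
      · have hp : [e].isPrefixOf (c :: rest) = false := by
          simp [List.isPrefixOf]; exact fun hh => absurd hh.symm h
        rw [PySem.Chars.splitOn.go, if_neg (by simp [hp])]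
        rw [ih rest (by simp at hl; omega) (c :: cur) acc]
        have hsp : (c :: rest).splitOn e
            = ((rest.splitOn e).modifyHead (List.cons c)) := by
          simp [List.splitOn, List.splitOnP_cons]
          intro hh; exact absurd hh h
        rw [hsp]
        obtain ⟨q, ps, hqps⟩ := List.exists_cons_of_ne_nil
          (show rest.splitOn e ≠ [] from by
            simp [List.splitOn]; exact List.splitOnP_ne_nil _ _)
        simp [hqps, List.modifyHead]

theorem chars_splitOn_single (e : Char) (l : List Char) :
    PySem.Chars.splitOn l [e] = l.splitOn e := by
  have := splitOn_go_spec e (l.length + 1) l (by omega) [] []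
  unfold PySem.Chars.splitOn
  rw [this]
  obtain ⟨q, ps, hqps⟩ := List.exists_cons_of_ne_nil
    (show l.splitOn e ≠ [] from by simp [List.splitOn]; exact List.splitOnP_ne_nil _ _)
  simp [hqps, List.modifyHead]

theorem splitOn_ne_nil (e : Char) (l : List Char) : l.splitOn e ≠ [] := by
  simp [List.splitOn]; exact List.splitOnP_ne_nil _ _

-- pvBParts over strings agrees with the same walk over the underlying char lists
def pvBPartsC (char_map escape_map : List (String × String)) (escape_char : String) :
    List (List Char) → List String
  | [] => []
  | p :: rest =>
    match p with
    | c :: cs =>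
        (pvSub escape_map (String.ofList [c]) ++ pvPlain char_map cs)
          :: pvBPartsC char_map escape_map escape_char rest
    | [] =>
      match rest with
      | [] => []
      | q :: rest' =>
          (pvSub escape_map escape_char ++ pvPlain char_map q)
            :: pvBPartsC char_map escape_map escape_char rest'

theorem pvBParts_map (cm em : List (String × String)) (ec : String) :
    ∀ ps : List (List Char),
      pvBParts cm em ec (ps.map String.ofList) = pvBPartsC cm em ec ps := by
  intro ps
  induction ps using pvBPartsC.induct with
  | case1 => simp [pvBParts, pvBPartsC]
  | case2 =>
    rename_i rest c cs ih
    rw [pvBParts.eq_def]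
    simp [pvBPartsC, String.toList_ofList, ih]
  | case3 =>
    rw [pvBParts.eq_def]
    simp [pvBPartsC]
  | case4 =>
    rename_i q rest' ih
    rw [pvBParts.eq_def]
    simp [pvBPartsC, String.toList_ofList, ih]

-- head-fragment view of B's result
def pvG (cm em : List (String × String)) (ec : String) (parts : List (List Char)) : String :=
  match parts with
  | [] => ""
  | p0 :: rest => pvPlain cm p0 ++ String.join (pvBPartsC cm em ec rest)

-- the central invariant: A's flagged scan equals B's fragment walk, in both flag states
theorem pvALoop_splitOn (cm em : List (String × String)) (e : Char) :
    ∀ l : List Char,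
      (∀ acc, pvALoop cm em (String.ofList [e]) l acc false
          = acc ++ pvG cm em (String.ofList [e]) (l.splitOn e)) ∧
      (∀ acc, pvALoop cm em (String.ofList [e]) l acc true
          = acc ++ String.join (pvBPartsC cm em (String.ofList [e]) (l.splitOn e))) := by
  intro l
  induction l with
  | nil =>
    constructor <;> intro acc <;>
      simp [pvALoop, pvG, pvBPartsC, List.splitOn, pvPlain, String.join]
  | cons c rest ih =>
    obtain ⟨ih0, ih1⟩ := ih
    obtain ⟨q, ps, hqps⟩ := List.exists_cons_of_ne_nil (splitOn_ne_nil e rest)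
    by_cases h : c = e
    · subst h
      have hsp : (c :: rest).splitOn c = [] :: rest.splitOn c := by
        simp [List.splitOn, List.splitOnP_cons]
      constructor <;> intro acc
      · rw [pvALoop, if_pos ⟨by simp, rfl⟩, ih1 acc, hsp]
        simp [pvG, pvPlain, join_nil_str, String.empty_append]
      · rw [pvALoop, if_neg (by simp), if_neg (by simp), ih0 (acc ++ pvMapGet em (String.ofList [c]))]
        rw [hsp, hqps]
        simp [pvBPartsC, pvG, join_cons, pvMapGet_eq_pvSub, String.append_assoc]
    · have hne : String.ofList [c] ≠ String.ofList [e] := by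
        intro hh
        exact h (by simpa using congrArg String.toList hh)
      have hsp : (c :: rest).splitOn e = (c :: q) :: ps := by
        simp only [List.splitOn, List.splitOnP_cons]
        rw [if_neg (by simp [h])]
        rw [show List.splitOnP (fun x => x == e) rest = q :: ps from by
          simpa [List.splitOn] using hqps]
        rfl
      constructor <;> intro acc
      · rw [pvALoop, if_neg (by simp [hne]), if_pos (by simp),
          ih0 (acc ++ pvMapGet cm (String.ofList [c])), hsp, hqps]
        simp [pvG, pvPlain, join_cons, pvMapGet_eq_pvSub, String.append_assoc]
      · rw [pvALoop, if_neg (by simp), if_neg (by simp),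
          ih0 (acc ++ pvMapGet em (String.ofList [c])), hsp, hqps]
        simp [pvBPartsC, pvG, join_cons, pvMapGet_eq_pvSub, String.append_assoc]

-- when the escape string is not a single character, no character ever equals it
theorem pvALoop_no_escape (cm em : List (String × String)) (ec : String)
    (hlen : ec.toList.length ≠ 1) :
    ∀ (l : List Char) (acc : String),
      pvALoop cm em ec l acc false = acc ++ pvPlain cm l := by
  intro l
  induction l with
  | nil => intro acc; simp [pvALoop, pvPlain, String.join]
  | cons c rest ih =>
    intro acc
    have hne : String.ofList [c] ≠ ec := by
      intro hh
      apply hlen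
      rw [← hh]
      simp
    rw [pvALoop, if_neg (by simp [hne]), if_pos (by simp), ih]
    simp [pvPlain, join_cons, String.append_assoc, pvMapGet_eq_pvSub]

-- ===== VERDICT =====
theorem string_remapper_spec : Claim_equal_string_remapper := by
  intro text cm em ec _
  unfold Spec_string_remapper string_remapper string_remapper_alt
  by_cases hlen : PySem.Str.len ec = 1
  · have hl1 : ec.toList.length = 1 := by
      unfold PySem.Str.len at hlen; exact_mod_cast hlen
    obtain ⟨e, he⟩ := List.length_eq_one_iff.mp hl1
    have hec : ec = String.ofList [e] := by
      rw [← he]; exact String.ofList_toList.symm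
    rw [if_pos hlen]
    have hsplit : PySem.Str.split? text ec
        = some ((text.toList.splitOn e).map String.ofList) := by
      unfold PySem.Str.split? PySem.Chars.split?
      rw [if_neg (by simp [he])]
      rw [he, chars_splitOn_single]
      rfl
    rw [hsplit]
    obtain ⟨q, ps, hqps⟩ := List.exists_cons_of_ne_nil (splitOn_ne_nil e text.toList)
    rw [hqps]
    simp only [List.map_cons]
    have := (pvALoop_splitOn cm em e text.toList).1 ""
    rw [hec, this, hqps]
    simp [pvG, join_cons, pvBParts_map]
  · rw [if_neg hlen]
    have : ec.toList.length ≠ 1 := by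
      intro hh; apply hlen; unfold PySem.Str.len; exact_mod_cast hh
    rw [pvALoop_no_escape cm em ec this]
    simp
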